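-- pv_equiv track=rewrite | github.com/dongzzzzzzzzz/ok-core-skill | property_advisor/routing.py | _collect_signals
-- ===== SOURCE A (Python) =====
-- def _collect_signals(text: str, weights: dict[str, int]) -> tuple[list[str], int]:
--     matches: list[str] = []
--     score = 0
--     for term, weight in weights.items():
--         if term in text:
--             matches.append(term)
--             score += weight
--     return matches, score
-- ===== SOURCE B (Python) =====
-- def _collect_signals(text: str, weights: dict[str, int]) -> tuple[list[str], int]:
--     maxlen = 0
--     for term in weights:
--         maxlen = max(maxlen, len(term))
--     n = len(text)
--     subs = {text[i:j] for i in range(n + 1) for j in range(i, min(i + maxlen, n) + 1)}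
--     matches = [t for t in weights if t in subs]
--     score = sum(w for t, w in weights.items() if t in subs)
--     return matches, score
-- ===== Notes on version B (the rewrite author's own statement) =====
-- stated objective: faster
-- what changed: Instead of scanning the whole text once per term, B builds a set of all substrings of the text of length up to the longest term once and decides each term by a single set-membership lookup.
import Mathlib
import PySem

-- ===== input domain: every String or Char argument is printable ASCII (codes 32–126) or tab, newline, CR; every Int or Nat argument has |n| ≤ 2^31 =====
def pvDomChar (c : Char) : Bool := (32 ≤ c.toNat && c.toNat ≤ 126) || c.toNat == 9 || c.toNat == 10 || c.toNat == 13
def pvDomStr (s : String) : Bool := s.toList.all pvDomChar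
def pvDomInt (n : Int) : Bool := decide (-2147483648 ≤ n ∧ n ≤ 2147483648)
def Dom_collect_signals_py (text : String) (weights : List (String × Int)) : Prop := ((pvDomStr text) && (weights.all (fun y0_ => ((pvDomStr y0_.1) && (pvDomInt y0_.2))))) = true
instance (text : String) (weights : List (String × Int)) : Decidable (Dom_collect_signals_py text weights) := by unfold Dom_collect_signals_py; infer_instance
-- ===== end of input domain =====

-- B replaces the per-term substring scan of the text by a set of all text substrings of length
-- up to the longest term, built once, with each term then tested by set membership (alternative algorithm).

-- ===== PORT A =====
-- one loop over weights.items(): if term in text, append term and add weight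
def collect_signals_py (text : String) (weights : List (String × Int)) : List String × Int :=
  weights.foldl
    (fun st p => if PySem.Str.isIn p.1 text then (st.1 ++ [p.1], st.2 + p.2) else st)
    ([], 0)

-- ===== PORT B =====
def collect_signals_py_alt (text : String) (weights : List (String × Int)) : List String × Int :=
  -- maxlen loop
  let maxlen : Int := weights.foldl (fun m p => max m (PySem.Str.len p.1)) 0
  let n : Int := PySem.Str.len text
  -- set comprehension {text[i:j] for i in range(n+1) for j in range(i, min(i+maxlen,n)+1)}
  let subs : PySem.Set String := PySem.Set.ofList
    ((PySem.List.pyRange 0 (n + 1) 1).flatMap (fun i =>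
      (PySem.List.pyRange i (min (i + maxlen) n + 1) 1).map (fun j =>
        PySem.Str.slice text (some i) (some j))))
  let matched : List String := (weights.filter (fun p => PySem.Set.contains subs p.1)).map (·.1)
  let score : Int := ((weights.filter (fun p => PySem.Set.contains subs p.1)).map (·.2)).sum
  (matched, score)

-- ===== PRECONDITION & SPEC =====
def Spec_collect_signals_py (text : String) (weights : List (String × Int)) (out : List String × Int) : Prop := out = collect_signals_py_alt text weights
instance (text : String) (weights : List (String × Int)) (out : List String × Int) : Decidable (Spec_collect_signals_py text weights out) := by unfold Spec_collect_signals_py; infer_instance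

-- ===== CLAIM (what is proved, stated in full; the proofs are below) =====
def Claim_equal_collect_signals_py : Prop := ∀ (text : String) (weights : List (String × Int)), Dom_collect_signals_py text weights → Spec_collect_signals_py text weights (collect_signals_py text weights)

-- ===== LEMMAS AND PROOFS =====

-- a term no longer than maxlen is in B's substring list iff it is a substring of the text
theorem mem_subs_iff_isIn (text t : String) (maxlen : Int)
    (hml : PySem.Str.len t ≤ maxlen) :
    (t ∈ ((PySem.List.pyRange 0 (PySem.Str.len text + 1) 1).flatMap (fun i =>
      (PySem.List.pyRange i (min (i + maxlen) (PySem.Str.len text) + 1) 1).map (fun j =>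
        PySem.Str.slice text (some i) (some j))))) ↔ PySem.Str.isIn t text = true := by
  rw [PySem.Str.isIn_iff_infix, PySem.Str.len_eq]
  constructor
  · intro h
    simp only [List.mem_flatMap, List.mem_map, PySem.List.mem_pyRange_one] at h
    obtain ⟨i, ⟨hi0, _⟩, j, ⟨⟨hij, _⟩, rfl⟩⟩ := h
    rw [PySem.Str.toList_slice, PySem.Chars.slice_eq_listSlice,
        PySem.List.slice_toNat _ hi0 (le_trans hi0 hij)]
    exact ((List.take_prefix _ _).isInfix).trans ((List.drop_suffix _ _).isInfix)
  · intro h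
    obtain ⟨s, r, hsr⟩ := h
    have hlen : s.length + t.toList.length + r.length = text.toList.length := by
      have := congrArg List.length hsr
      simp only [List.length_append] at this
      omega
    have hmlt : (t.toList.length : Int) ≤ maxlen := by
      rw [PySem.Str.len_eq] at hml; exact hml
    refine List.mem_flatMap.mpr ⟨((s.length : Nat) : Int), ?_, ?_⟩
    · rw [PySem.List.mem_pyRange_one]
      constructor
      · positivity
      · omega
    · refine List.mem_map.mpr ⟨(((s.length + t.toList.length : Nat)) : Int), ?_, ?_⟩
      · rw [PySem.List.mem_pyRange_one]
        constructor
        · push_cast; omega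
        · push_cast; push_cast at hmlt; omega
      · apply String.toList_inj.mp
        rw [PySem.Str.toList_slice, PySem.Chars.slice_eq_listSlice,
            PySem.List.slice_toNat _ (by positivity) (by positivity)]
        simp only [Int.toNat_natCast]
        rw [← hsr, List.append_assoc, List.drop_left, Nat.add_sub_cancel_left,
            List.take_left]

-- for each entry of weights, B's set test agrees with A's substring test
theorem collect_key (text : String) (weights : List (String × Int)) (p : String × Int)
    (hp : p ∈ weights) :
    PySem.Set.contains (PySem.Set.ofList
      ((PySem.List.pyRange 0 (PySem.Str.len text + 1) 1).flatMap (fun i =>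
        (PySem.List.pyRange i (min (i + (weights.foldl (fun m q => max m (PySem.Str.len q.1)) 0)) (PySem.Str.len text) + 1) 1).map (fun j =>
          PySem.Str.slice text (some i) (some j))))) p.1 = PySem.Str.isIn p.1 text := by
  have hml : PySem.Str.len p.1 ≤ weights.foldl (fun m q => max m (PySem.Str.len q.1)) 0 :=
    (PySem.List.le_foldl_max_int weights (fun q => PySem.Str.len q.1) 0).2 p hp
  by_cases h : PySem.Str.isIn p.1 text = true
  · rw [h]
    rw [PySem.Set.contains_iff, PySem.Set.mem_ofList]
    exact (mem_subs_iff_isIn text p.1 _ hml).mpr h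
  · rw [Bool.not_eq_true] at h
    rw [h]
    rw [← Bool.not_eq_true, PySem.Set.contains_iff, PySem.Set.mem_ofList]
    intro hmem
    have := (mem_subs_iff_isIn text p.1 _ hml).mp hmem
    rw [this] at h
    exact Bool.true_eq_false.mp h

-- ===== VERDICT (by name: the statement is the Claim_ definition above) =====
theorem collect_signals_py_spec : Claim_equal_collect_signals_py := by
  intro text weights _
  unfold Spec_collect_signals_py collect_signals_py collect_signals_py_alt
  dsimp only
  rw [PySem.List.foldl_congr_mem _ _
    (fun st (p : String × Int) => (if PySem.Str.isIn p.1 text then st.1 ++ [p.1] else st.1,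
       if PySem.Str.isIn p.1 text then st.2 + p.2 else st.2)) _
    (by intro acc x _; dsimp only; split_ifs <;> rfl)]
  rw [PySem.List.foldl_prod_mk
    (f := fun (a : List String) (p : String × Int) => if PySem.Str.isIn p.1 text then a ++ [p.1] else a)
    (g := fun (b : Int) (p : String × Int) => if PySem.Str.isIn p.1 text then b + p.2 else b)]
  rw [PySem.List.foldl_append_if (fun (p : String × Int) => PySem.Str.isIn p.1 text) (fun p => p.1)]
  rw [PySem.List.foldl_if_eq_foldl_filter (fun (p : String × Int) => PySem.Str.isIn p.1 text) (fun b p => b + p.2)]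
  rw [PySem.List.foldl_add]
  have hfilter : weights.filter (fun p => PySem.Str.isIn p.1 text)
      = weights.filter (fun p => PySem.Set.contains (PySem.Set.ofList
        ((PySem.List.pyRange 0 (PySem.Str.len text + 1) 1).flatMap (fun i =>
          (PySem.List.pyRange i (min (i + (weights.foldl (fun m q => max m (PySem.Str.len q.1)) 0)) (PySem.Str.len text) + 1) 1).map (fun j =>
            PySem.Str.slice text (some i) (some j))))) p.1) := by
    apply List.filter_congr
    intro p hp
    exact (collect_key text weights p hp).symm
  simp only [List.nil_append, zero_add, hfilter]
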